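-- pv_equiv track=rewrite | github.com/kdh4970/CodingTest | Programmers/LV2/의상.py | solution
-- ===== SOURCE A (Python) =====
-- def solution(clothes):
--     where = set()
--     for clothe in clothes:
--         where.add(clothe[1])
--     where = list(where)
--     items = [0]*len(where)
--     for clothe in clothes:
--         items[where.index(clothe[1])]+=1
--     answer = 1
--     for item in items:
--         answer*=item+1
--
--     return answer-1
-- ===== SOURCE B (Python) =====
-- def solution(clothes):
--     # sort categories, then multiply (run length + 1) over consecutive equal runs
--     cats = sorted(clothe[1] for clothe in clothes)
--
--     def prod_runs(xs):
--         if not xs: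
--             return 1
--         head = xs[0]
--         rest = xs[1:]
--         k = 1
--         while rest and rest[0] == head:
--             k += 1
--             rest = rest[1:]
--         return (k + 1) * prod_runs(rest)
--
--     return prod_runs(cats) - 1
-- ===== Notes on version B (the rewrite author's own statement) =====
-- stated objective: alternative
-- what changed: Replaced the set-build plus list.index counting passes with sorting the categories and multiplying (run length + 1) over consecutive equal runs of the sorted list.
import Mathlib
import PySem

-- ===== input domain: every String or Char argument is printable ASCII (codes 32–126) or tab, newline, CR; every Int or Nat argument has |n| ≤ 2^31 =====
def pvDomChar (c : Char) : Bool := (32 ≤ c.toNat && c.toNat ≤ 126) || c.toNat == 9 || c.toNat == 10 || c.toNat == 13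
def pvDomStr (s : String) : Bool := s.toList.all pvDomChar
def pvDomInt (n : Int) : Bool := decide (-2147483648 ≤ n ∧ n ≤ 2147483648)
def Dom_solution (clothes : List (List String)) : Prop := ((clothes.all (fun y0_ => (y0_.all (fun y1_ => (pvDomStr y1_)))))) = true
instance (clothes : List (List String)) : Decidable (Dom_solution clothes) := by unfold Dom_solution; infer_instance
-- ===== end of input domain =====

-- B changes the algorithm only: sorted categories grouped into consecutive runs instead of set-build + list.index counting; same value proved.

-- ===== PORT A =====
-- clothe[1]; Pre_solution guarantees the index is in range (the port is exact there)
def pvCat (c : List String) : String := (PySem.List.pyGet? c 1).getD ""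

def solution (clothes : List (List String)) : Int :=
  let whereS : PySem.Set String :=
    clothes.foldl (fun s c => PySem.Set.add s (pvCat c)) PySem.Set.empty
  let items : List Int :=
    clothes.foldl (fun items c =>
      match PySem.List.index? whereS (pvCat c) with
      | some i => items.set i (items.getD i 0 + 1)
      | none => items)   -- unreachable: every category was added to the set
      (List.replicate whereS.length (0 : Int))
  let answer := items.foldl (fun a it => a * (it + 1)) 1
  answer - 1

-- ===== PORT B =====
-- the inner while loop of prod_runs: (extra run length of c at the front, remaining list)
def runSplit (c : String) : List String → Nat × List String
  | [] => (0, [])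
  | x :: xs =>
      if x = c then
        let r := runSplit c xs
        (r.1 + 1, r.2)
      else (0, x :: xs)

lemma runSplit_length_le (c : String) (xs : List String) :
    (runSplit c xs).2.length ≤ xs.length := by
  induction xs with
  | nil => simp [runSplit]
  | cons x xs ih =>
      simp only [runSplit]
      split
      · exact Nat.le_succ_of_le ih
      · simp

def prodRuns : List String → Int
  | [] => 1
  | c :: rest =>
      let r := runSplit c rest
      ((r.1 : Int) + 1 + 1) * prodRuns r.2
termination_by l => l.length
decreasing_by
  exact Nat.lt_succ_of_le (runSplit_length_le c rest)

def solution_alt (clothes : List (List String)) : Int :=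
  let cats := PySem.List.sorted (clothes.map pvCat) (fun x => x) false
  prodRuns cats - 1

-- ===== PRECONDITION & SPEC =====
-- Pre_ excludes exactly the inputs where clothe[1] raises IndexError (some clothe shorter than 2)
def Pre_solution (clothes : List (List String)) : Prop :=
  ∀ c ∈ clothes, 2 ≤ c.length
instance (clothes : List (List String)) : Decidable (Pre_solution clothes) := by
  unfold Pre_solution; infer_instance

def pvWitness_solution : List (List String) :=
  [["yellow_hat", "headgear"], ["blue_sunglasses", "eyewear"], ["green_turban", "headgear"]]

def Spec_solution (clothes : List (List String)) (out : Int) : Prop := out = solution_alt clothes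
instance (clothes : List (List String)) (out : Int) : Decidable (Spec_solution clothes out) := by unfold Spec_solution; infer_instance

-- ===== CLAIM (what is proved, stated in full; the proofs are below) =====
def Claim_equal_solution : Prop := ∀ (clothes : List (List String)), Dom_solution clothes → Pre_solution clothes → Spec_solution clothes (solution clothes)

-- ===== LEMMAS AND PROOFS =====

-- set-at-the-index-of-x on a mapped nodup list = map with f bumped at x
lemma set_map_index {W : List String} {f : String → Int} {x : String} {i : Nat}
    (hnd : W.Nodup) (hi : i < W.length) (hx : W[i] = x) :
    (W.map f).set i (f x + 1) = W.map (fun c => if c = x then f c + 1 else f c) := by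
  apply List.ext_getElem
  · simp
  · intro j hj hj'
    have hjW : j < W.length := by simpa using hj
    rw [List.getElem_set, List.getElem_map, List.getElem_map]
    by_cases hji : i = j
    · subst hji
      simp [hx]
    · have hne : W[j] ≠ x := by
        intro h
        exact hji ((List.Nodup.getElem_inj_iff hnd).mp (by rw [hx, h]))
      simp [hji, hne]

-- the counting loop over P, started from W.map f, ends at W.map (f + count in P)
lemma items_loop (W : List String) (hnd : W.Nodup) :
    ∀ (P : List String) (f : String → Int), (∀ x ∈ P, x ∈ W) →
    P.foldl (fun items x =>
        match PySem.List.index? W x with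
        | some i => items.set i (items.getD i 0 + 1)
        | none => items) (W.map f)
      = W.map (fun c => f c + P.count c) := by
  intro P
  induction P with
  | nil => intro f _; simp
  | cons x P ih =>
      intro f hmem
      have hxW : x ∈ W := hmem x (List.mem_cons_self ..)
      obtain ⟨i, hi⟩ : ∃ i, PySem.List.index? W x = some i :=
        Option.isSome_iff_exists.mp ((PySem.List.index?_isSome_iff (xs := W) (v := x)).mpr hxW)
      obtain ⟨hlt, hWi, _⟩ := PySem.List.getElem_of_index?_eq_some hi
      have hgetD : (W.map f).getD i 0 = f x := by
        rw [List.getD_eq_getElem _ _ (by simpa using hlt), List.getElem_map, hWi]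
      rw [List.foldl_cons, hi]
      simp only
      rw [hgetD, set_map_index hnd hlt hWi,
          ih (fun c => if c = x then f c + 1 else f c) (fun y hy => hmem y (List.mem_cons_of_mem _ hy))]
      apply List.map_congr_left
      intro c _
      by_cases hc : c = x
      · subst hc; simp [List.count_cons_self]; ring
      · simp [hc, List.count_cons_of_ne (fun h => hc h.symm)]

-- foldl multiply = product of the (·+1)-map
lemma foldl_mul_eq_prod (l : List Int) :
    ∀ (a : Int), l.foldl (fun a it => a * (it + 1)) a = a * (l.map (· + 1)).prod := by
  induction l with
  | nil => intro a; simp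
  | cons x l ih => intro a; simp [ih]; ring

-- A's value in closed form
lemma solution_closed (clothes : List (List String)) :
    solution clothes =
      ((PySem.Set.ofList (clothes.map pvCat)).map
        (fun c => ((clothes.map pvCat).count c : Int) + 1)).prod - 1 := by
  unfold solution
  have hW : clothes.foldl (fun s c => PySem.Set.add s (pvCat c)) PySem.Set.empty
      = PySem.Set.ofList (clothes.map pvCat) := by
    rw [PySem.Set.ofList_eq_foldl, ← List.foldl_map]
    rfl
  simp only [hW]
  set L := clothes.map pvCat with hL
  set W := PySem.Set.ofList L with hWdef
  have hrepl : (List.replicate W.length (0 : Int)) = W.map (fun _ => (0 : Int)) := by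
    simp
  have hfold : clothes.foldl (fun items c =>
      match PySem.List.index? W (pvCat c) with
      | some i => items.set i (items.getD i 0 + 1)
      | none => items) (List.replicate W.length (0 : Int))
      = W.map (fun c => ((0 : Int) + L.count c)) := by
    rw [hrepl]
    have hmap := List.foldl_map (f := pvCat) (g := fun (items : List Int) (x : String) =>
      match PySem.List.index? W x with
      | some i => items.set i (items.getD i 0 + 1)
      | none => items) (l := clothes) (init := W.map (fun _ => (0 : Int)))
    have hloop := items_loop W (PySem.Set.nodup_ofList L) L (fun _ => (0 : Int))
        (fun x hx => (PySem.Set.mem_ofList L x).mpr hx)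
    exact hmap.symm.trans hloop
  rw [hfold, foldl_mul_eq_prod]
  simp only [List.map_map, Function.comp_def, one_mul, zero_add]

-- discard is a no-op when the element is absent
lemma discard_of_not_mem {s : List String} {x : String} (h : x ∉ s) :
    PySem.Set.discard s x = s := by
  simp [PySem.Set.discard]
  exact fun a ha heq => h (heq ▸ ha)

lemma discard_cons_self (s : List String) (x : String) :
    PySem.Set.discard (x :: s) x = PySem.Set.discard s x := by
  simp [PySem.Set.discard]

-- first-occurrence dedup of a block of c followed by a c-free tail
lemma ofList_block (c : String) (r : List String) (hc : c ∉ r) :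
    ∀ (k : Nat), PySem.Set.ofList (c :: (List.replicate k c ++ r)) = c :: PySem.Set.ofList r := by
  intro k
  induction k with
  | zero =>
      rw [List.replicate, List.nil_append, PySem.Set.ofList_cons,
          discard_of_not_mem (fun hm => hc ((PySem.Set.mem_ofList r c).mp hm))]
  | succ k ih =>
      rw [List.replicate_succ, List.cons_append, PySem.Set.ofList_cons]
      have : PySem.Set.ofList (c :: (List.replicate k c ++ r)) = c :: PySem.Set.ofList r := ih
      rw [this, discard_cons_self,
          discard_of_not_mem (fun hm => hc ((PySem.Set.mem_ofList r c).mp hm))]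

-- runSplit on a sorted tail: the tail is (replicate of c) ++ rest with no c left in rest
lemma runSplit_spec (c : String) (xs : List String) (h : (c :: xs).Pairwise (· ≤ ·)) :
    xs = List.replicate (runSplit c xs).1 c ++ (runSplit c xs).2 ∧ c ∉ (runSplit c xs).2 := by
  induction xs with
  | nil => simp [runSplit]
  | cons x xs ih =>
      by_cases hx : x = c
      · subst hx
        have h' : (x :: xs).Pairwise (· ≤ ·) := h.tail
        obtain ⟨h1, h2⟩ := ih h'
        have hr : runSplit x (x :: xs) = ((runSplit x xs).1 + 1, (runSplit x xs).2) := by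
          simp [runSplit]
        rw [hr]
        refine ⟨?_, h2⟩
        rw [List.replicate_succ]
        simpa using h1
      · have hr : runSplit c (x :: xs) = (0, x :: xs) := by
          simp [runSplit, hx]
        rw [hr]
        refine ⟨rfl, ?_⟩
        intro hmem
        rcases List.mem_cons.mp hmem with hc | hc
        · exact hx hc.symm
        · have hcx : c ≤ x := (List.pairwise_cons.mp h).1 x (List.mem_cons_self ..)
          have hxc : x ≤ c := (List.pairwise_cons.mp h.tail).1 c hc
          exact hx (le_antisymm hxc hcx)

-- B's value in closed form on a sorted list
lemma prodRuns_closed : ∀ (M : List String), M.Pairwise (· ≤ ·) →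
    prodRuns M = ((PySem.List.dedup M).map (fun c => (M.count c : Int) + 1)).prod := by
  intro M
  induction M using prodRuns.induct with
  | case1 => intro _; simp [prodRuns, PySem.List.dedup]
  | case2 c rest r ih =>
      intro h
      have hr : r = runSplit c rest := rfl
      rw [hr] at ih
      obtain ⟨hsplit, hnot⟩ := runSplit_spec c rest h
      have hM : c :: rest = c :: (List.replicate (runSplit c rest).1 c ++ (runSplit c rest).2) := by
        rw [← hsplit]
      have htailpw : (runSplit c rest).2.Pairwise (· ≤ ·) := by
        have hsub : List.Sublist (runSplit c rest).2 (c :: rest) := by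
          rw [hM]
          exact ((List.sublist_append_right _ _).trans (List.sublist_cons_self _ _))
        exact h.sublist hsub
      have hcount : (c :: rest).count c = (runSplit c rest).1 + 1 := by
        rw [hM]
        simp [List.count_cons_self, List.count_append, List.count_eq_zero.mpr hnot]
      have hded : PySem.List.dedup (c :: rest) = c :: PySem.Set.ofList (runSplit c rest).2 := by
        rw [hM, PySem.List.dedup_eq_ofList]
        exact ofList_block c (runSplit c rest).2 hnot (runSplit c rest).1
      rw [prodRuns, hded]
      simp only [List.map_cons, List.prod_cons, hcount]
      rw [ih htailpw]
      have hcongr : (PySem.List.dedup (runSplit c rest).2).map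
            (fun x => (((runSplit c rest).2.count x : Int)) + 1)
          = (PySem.Set.ofList (runSplit c rest).2).map
            (fun x => (((c :: rest).count x : Int)) + 1) := by
        simp only [PySem.List.dedup_eq_ofList]
        apply List.map_congr_left
        intro x hx
        have hxmem : x ∈ (runSplit c rest).2 := (PySem.Set.mem_ofList _ x).mp hx
        have hne : x ≠ c := fun h' => hnot (h' ▸ hxmem)
        have hcx : (c :: rest).count x = (runSplit c rest).2.count x := by
          rw [hM]
          simp [List.count_cons_of_ne (fun h' => hne h'.symm), List.count_append,
                List.count_replicate]
          exact fun h' => absurd h'.symm hne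
        rw [hcx]
      rw [hcongr]
      push_cast
      ring

theorem solution_spec : Claim_equal_solution := by
  intro clothes _ _
  unfold Spec_solution solution_alt
  rw [solution_closed]
  set L := clothes.map pvCat with hL
  set M := PySem.List.sorted L (fun x => x) false with hM
  have hpw : M.Pairwise (· ≤ ·) := PySem.List.sorted_pairwise L (fun x => x)
  simp only
  rw [prodRuns_closed M hpw]
  have hperm : (PySem.List.dedup M).Perm (PySem.Set.ofList L) := by
    rw [PySem.List.dedup_eq_ofList]
    apply (List.perm_ext_iff_of_nodup (PySem.Set.nodup_ofList M) (PySem.Set.nodup_ofList L)).mpr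
    intro a
    rw [PySem.Set.mem_ofList M a, PySem.Set.mem_ofList L a]
    exact (PySem.List.sorted_perm L (fun x => x) false).mem_iff
  have hcnt : ∀ c, M.count c = L.count c := fun c =>
    (PySem.List.sorted_perm L (fun x => x) false).count_eq c
  have : ((PySem.List.dedup M).map (fun c => (M.count c : Int) + 1)).prod
      = ((PySem.Set.ofList L).map (fun c => (L.count c : Int) + 1)).prod := by
    have h1 : (PySem.List.dedup M).map (fun c => (M.count c : Int) + 1)
        = (PySem.List.dedup M).map (fun c => (L.count c : Int) + 1) := by
      apply List.map_congr_left; intro c _; rw [hcnt]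
    rw [h1]
    exact (hperm.map _).prod_eq
  rw [this]
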